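-- pv_equiv track=rewrite | github.com/kts5927/algorithm | solve/2401.py | solve
-- ===== SOURCE A (Python) =====
-- def solve(String, canPaste, L):
--     cache = [0] * (L + 1)
--
--     for pos in range(L - 1, -1, -1):
--         cache[pos] = cache[pos + 1]
--         if pos in canPaste:
--             for word_length in canPaste[pos]:
--                 cache[pos] = max(cache[pos], cache[pos + word_length] + word_length)
--
--     return cache[0]
-- ===== SOURCE B (Python) =====
-- def solve(String, canPaste, L):
--     # Precompute, for every position j, the lengths of pasteable words that END at j,
--     # then fill a prefix DP left to right, each cell pulling from its word ends.
--     ends = [[] for _ in range(L + 1)]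
--     for start, lengths in canPaste.items():
--         if 0 <= start < L:
--             for w in lengths:
--                 ends[start + w].append(w)
--     best = [0] * (L + 1)
--     for j in range(1, L + 1):
--         b = best[j - 1]
--         for w in ends[j]:
--             c = best[j - w] + w
--             if c > b:
--                 b = c
--         best[j] = b
--     return best[L]
-- ===== Notes on version B (the rewrite author's own statement) =====
-- stated objective: alternative
-- what changed: A fills a suffix DP right-to-left, looking up pasteable word starts per position; B first builds a reverse index of word lengths keyed by END position and then fills a prefix DP left-to-right, each cell pulling once from that index.
-- outside the precondition, e.g. on solve('', {0: [-1]}, 1): A returns 0, B raises IndexError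
import Mathlib
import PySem

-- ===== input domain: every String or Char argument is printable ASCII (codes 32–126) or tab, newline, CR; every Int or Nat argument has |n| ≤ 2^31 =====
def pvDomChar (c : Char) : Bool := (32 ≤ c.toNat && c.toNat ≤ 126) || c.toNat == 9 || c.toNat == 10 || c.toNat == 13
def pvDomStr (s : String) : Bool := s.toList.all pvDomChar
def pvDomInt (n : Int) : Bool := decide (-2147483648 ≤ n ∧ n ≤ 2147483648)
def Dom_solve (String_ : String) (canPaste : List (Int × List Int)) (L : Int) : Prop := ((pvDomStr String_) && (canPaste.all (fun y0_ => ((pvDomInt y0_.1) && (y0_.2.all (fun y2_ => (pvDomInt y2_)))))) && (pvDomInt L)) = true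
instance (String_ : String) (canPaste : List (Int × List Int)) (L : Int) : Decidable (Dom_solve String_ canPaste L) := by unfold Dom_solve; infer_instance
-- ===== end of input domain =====

-- B replaces A's right-to-left suffix DP (keyed by word START positions) with a reverse index of
-- word lengths keyed by END position plus a left-to-right prefix DP; proved to return A's value on Pre_.


-- ===== PORT A =====
def solve (String_ : String) (canPaste : List (Int × List Int)) (L : Int) : Int :=
  -- cache = [0] * (L + 1)
  let cache : List Int := List.replicate (L + 1).toNat 0
  -- for pos in range(L - 1, -1, -1):
  let cache := (PySem.List.pyRange (L - 1) (-1) (-1)).foldl (fun cache pos =>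
    -- cache[pos] = cache[pos + 1]
    let cache := PySem.List.pySetD cache pos (PySem.List.pyGetD cache (pos + 1) 0)
    -- if pos in canPaste: for word_length in canPaste[pos]: cache[pos] = max(...)
    match canPaste.lookup pos with
    | some ws => ws.foldl (fun cache w =>
        PySem.List.pySetD cache pos
          (max (PySem.List.pyGetD cache pos 0) (PySem.List.pyGetD cache (pos + w) 0 + w))) cache
    | none => cache) cache
  -- return cache[0]
  PySem.List.pyGetD cache 0 0

-- ===== PORT B =====
def solve_alt (String_ : String) (canPaste : List (Int × List Int)) (L : Int) : Int :=
  -- ends = [[] for _ in range(L + 1)]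
  let ends : List (List Int) := List.replicate (L + 1).toNat []
  -- for start, lengths in canPaste.items(): if 0 <= start < L: for w in lengths: ends[start+w].append(w)
  let ends := canPaste.foldl (fun ends q =>
    if 0 ≤ q.1 ∧ q.1 < L then
      q.2.foldl (fun ends w =>
        PySem.List.pySetD ends (q.1 + w) (PySem.List.pyGetD ends (q.1 + w) [] ++ [w])) ends
    else ends) ends
  -- best = [0] * (L + 1)
  let best : List Int := List.replicate (L + 1).toNat 0
  -- for j in range(1, L + 1): b = best[j-1]; for w in ends[j]: c = best[j-w]+w; if c > b: b = c;; best[j] = b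
  let best := (PySem.List.pyRange 1 (L + 1) 1).foldl (fun best j =>
    let b := PySem.List.pyGetD best (j - 1) 0
    let b := (PySem.List.pyGetD ends j []).foldl (fun b w =>
      let c := PySem.List.pyGetD best (j - w) 0 + w
      if b < c then c else b) b
    PySem.List.pySetD best j b) best
  -- return best[L]
  PySem.List.pyGetD best L 0

-- ===== PRECONDITION & SPEC =====
-- Pre_ restricts to the natural domain of the task: L ≥ 0, dict keys distinct (automatic for a real
-- Python dict), and every word pasteable at a position p in [0, L) has length w with 0 ≤ w ≤ L - p.
-- Outside it A raises IndexError or (for a negative word length with -(L+1) ≤ p+w < 0) returns an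
-- accidental value via Python negative-index wraparound, where B's own indexing raises IndexError.
def Pre_solve (String_ : String) (canPaste : List (Int × List Int)) (L : Int) : Prop :=
  0 ≤ L ∧ (canPaste.map Prod.fst).Nodup ∧
  ∀ q ∈ canPaste, 0 ≤ q.1 → q.1 < L → ∀ w ∈ q.2, 0 ≤ w ∧ q.1 + w ≤ L
instance (String_ : String) (canPaste : List (Int × List Int)) (L : Int) : Decidable (Pre_solve String_ canPaste L) := by unfold Pre_solve; infer_instance

def pvWitness_solve : String × (List (Int × List Int)) × Int := ("", [((0:Int), [(1:Int)])], (2:Int))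

def Spec_solve (String_ : String) (canPaste : List (Int × List Int)) (L : Int) (out : Int) : Prop := out = solve_alt String_ canPaste L
instance (String_ : String) (canPaste : List (Int × List Int)) (L : Int) (out : Int) : Decidable (Spec_solve String_ canPaste L out) := by unfold Spec_solve; infer_instance

-- ===== CLAIM (what is proved, stated in full; the proofs are below) =====
def Claim_equal_solve : Prop := ∀ (String_ : String) (canPaste : List (Int × List Int)) (L : Int), Dom_solve String_ canPaste L → Pre_solve String_ canPaste L → Spec_solve String_ canPaste L (solve String_ canPaste L)

-- ===== LEMMAS AND PROOFS =====

-- Abbreviated reads (Python xs[i] with default; only applied at in-range indices in the proofs).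
def geti (xs : List Int) (i : Int) : Int := PySem.List.pyGetD xs i 0
def getl (xs : List (List Int)) (i : Int) : List Int := PySem.List.pyGetD xs i []

theorem lookup_mem {l : List (Int × List Int)} {k : Int} {v : List Int}
    (h : l.lookup k = some v) : (k, v) ∈ l := by
  induction l with
  | nil => simp [List.lookup] at h
  | cons p t ih =>
    rw [List.lookup] at h
    by_cases hk : k = p.1
    · simp [hk] at h
      exact List.mem_cons.mpr (Or.inl (by rw [hk, ← h]))
    · rw [show (k == p.1) = false by simpa using hk] at h
      exact List.mem_cons_of_mem _ (ih h)

theorem mem_lookup {l : List (Int × List Int)} {k : Int} {v : List Int}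
    (hnd : (l.map Prod.fst).Nodup) (h : (k, v) ∈ l) : l.lookup k = some v := by
  induction l with
  | nil => simp at h
  | cons p t ih =>
    rw [List.map_cons, List.nodup_cons] at hnd
    rcases List.mem_cons.mp h with h1 | h1
    · rw [← h1, List.lookup]; simp
    · have hk : k ≠ p.1 := by
        intro he
        exact hnd.1 (he ▸ List.mem_map_of_mem (f := Prod.fst) h1)
      rw [List.lookup, show (k == p.1) = false by simpa using hk]
      exact ih hnd.2 h1

theorem pyGetD_generic_set {α : Type} (d : α) {xs : List α} {i : Int} (m : Int) (v : α)
    (h0 : 0 ≤ i) (h1 : i < xs.length) (hm : 0 ≤ m) :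
    PySem.List.pyGetD (PySem.List.pySetD xs i v) m d = if m = i then v else PySem.List.pyGetD xs m d := by
  by_cases hm2 : m < xs.length
  · rw [show i = ((i.toNat : ℕ) : ℤ) by omega, show m = ((m.toNat : ℕ) : ℤ) by omega,
      PySem.List.pyGetD_pySetD_natCast xs i.toNat m.toNat v d (by omega)]
    by_cases he : m.toNat = i.toNat
    · rw [if_pos he, if_pos (show ((m.toNat : ℕ) : ℤ) = ((i.toNat : ℕ) : ℤ) by omega)]
    · rw [if_neg he, if_neg (show ¬ ((m.toNat : ℕ) : ℤ) = ((i.toNat : ℕ) : ℤ) by omega)]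
  · have hne : ¬ (m = i) := by omega
    have hout : PySem.List.pyGet? xs m = none := by
      rw [PySem.List.pyGet?_of_nonneg _ hm]
      exact List.getElem?_eq_none (by omega)
    have hout2 : PySem.List.pyGet? (PySem.List.pySetD xs i v) m = none := by
      rw [PySem.List.pyGet?_of_nonneg _ hm]
      exact List.getElem?_eq_none (by simp [PySem.List.length_pySetD]; omega)
    rw [PySem.List.pyGetD_of_none _ _ _ hout, PySem.List.pyGetD_of_none _ _ _ hout2, if_neg hne]

theorem geti_set {xs : List Int} {i : Int} (m : Int) (v : Int)
    (h0 : 0 ≤ i) (h1 : i < xs.length) (hm : 0 ≤ m) :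
    geti (PySem.List.pySetD xs i v) m = if m = i then v else geti xs m :=
  pyGetD_generic_set 0 m v h0 h1 hm

theorem getl_set {xs : List (List Int)} {i : Int} (m : Int) (v : List Int)
    (h0 : 0 ≤ i) (h1 : i < xs.length) (hm : 0 ≤ m) :
    getl (PySem.List.pySetD xs i v) m = if m = i then v else getl xs m :=
  pyGetD_generic_set [] m v h0 h1 hm

theorem geti_replicate {n : ℕ} (q : Int) : geti (List.replicate n (0:Int)) q = 0 := by
  unfold geti
  by_cases h : 0 ≤ q ∧ q < n
  · rw [PySem.List.pyGetD_eq_getElem _ _ h.1 (by simpa using h.2)]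
    simp
  · by_cases hr : PySem.Raise.InRange (List.replicate n (0:Int)).length q
    · exact List.eq_of_mem_replicate (PySem.List.pyGetD_mem _ 0 hr)
    · exact PySem.List.pyGetD_of_none _ _ _ ((PySem.List.pyGet?_eq_none_iff _ _).mpr hr)

theorem getl_replicate {n : ℕ} {q : Int} (h0 : 0 ≤ q) (h1 : q < n) :
    getl (List.replicate n ([]:List Int)) q = [] := by
  unfold getl
  rw [PySem.List.pyGetD_eq_getElem _ _ h0 (by simpa using h1)]
  simp

inductive Covers (C : List (Int × List Int)) (L : Int) : Int → Int → Prop where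
  | base : Covers C L L 0
  | skip : ∀ {a v}, 0 ≤ a → a < L → Covers C L (a + 1) v → Covers C L a v
  | word : ∀ {a ws w v}, 0 ≤ a → a < L → C.lookup a = some ws → w ∈ ws → 0 < w → a + w ≤ L →
      Covers C L (a + w) v → Covers C L a (v + w)

inductive CoversB (C : List (Int × List Int)) (L : Int) : Int → Int → Prop where
  | base : CoversB C L 0 0
  | skip : ∀ {j v}, 0 ≤ j → j < L → CoversB C L j v → CoversB C L (j + 1) v
  | word : ∀ {i ws w v}, 0 ≤ i → i < L → C.lookup i = some ws → w ∈ ws → 0 < w → i + w ≤ L →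
      CoversB C L i v → CoversB C L (i + w) (v + w)

theorem coversB_zero {C : List (Int × List Int)} {L : Int} :
    ∀ j : Int, 0 ≤ j → j ≤ L → CoversB C L j 0 := by
  have key : ∀ (k : ℕ) (j : Int), j = k → j ≤ L → CoversB C L j 0 := by
    intro k
    induction k with
    | zero => intro j hj _; rw [hj]; exact CoversB.base
    | succ k ih =>
      intro j hj hle
      have : CoversB C L (j - 1 + 1) 0 :=
        CoversB.skip (by omega) (by omega) (ih (j - 1) (by omega) (by omega))
      simpa using this
  intro j h0 h1
  exact key j.toNat j (by omega) h1

theorem splice {C : List (Int × List Int)} {L a v u : Int}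
    (h : Covers C L a v) (hb : CoversB C L a u) : CoversB C L L (u + v) := by
  induction h generalizing u with
  | base => simpa using hb
  | skip h0 h1 _ ih => exact ih (CoversB.skip h0 h1 hb)
  | @word a ws w v0 h0 h1 hlk hw hwp hle _ ih =>
    have h2 := ih (CoversB.word h0 h1 hlk hw hwp hle hb)
    have he : u + (v0 + w) = u + w + v0 := by ring
    rw [he]; exact h2

theorem revSplice {C : List (Int × List Int)} {L j v u : Int}
    (h : CoversB C L j v) (hf : Covers C L j u) : Covers C L 0 (u + v) := by
  induction h generalizing u with
  | base => simpa using hf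
  | skip h0 h1 _ ih => exact ih (Covers.skip h0 h1 hf)
  | @word i ws w v0 h0 h1 hlk hw hwp hle _ ih =>
    have h2 := ih (Covers.word h0 h1 hlk hw hwp hle hf)
    have he : u + (v0 + w) = u + w + v0 := by ring
    rw [he]; exact h2

def PreP (C : List (Int × List Int)) (L : Int) : Prop :=
  ∀ q ∈ C, 0 ≤ q.1 → q.1 < L → ∀ w ∈ q.2, 0 ≤ w ∧ q.1 + w ≤ L

-- named forms of the loop bodies of the two ports
def stepA (C : List (Int × List Int)) (cache : List Int) (pos : Int) : List Int :=
  let cache := PySem.List.pySetD cache pos (PySem.List.pyGetD cache (pos + 1) 0)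
  match C.lookup pos with
  | some ws => ws.foldl (fun cache w =>
      PySem.List.pySetD cache pos
        (max (PySem.List.pyGetD cache pos 0) (PySem.List.pyGetD cache (pos + w) 0 + w))) cache
  | none => cache

def stepE (L : Int) (ends : List (List Int)) (q : Int × List Int) : List (List Int) :=
  if 0 ≤ q.1 ∧ q.1 < L then
    q.2.foldl (fun ends w =>
      PySem.List.pySetD ends (q.1 + w) (PySem.List.pyGetD ends (q.1 + w) [] ++ [w])) ends
  else ends

def stepB (ends : List (List Int)) (best : List Int) (j : Int) : List Int :=
  let b := PySem.List.pyGetD best (j - 1) 0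
  let b := (PySem.List.pyGetD ends j []).foldl (fun b w =>
    let c := PySem.List.pyGetD best (j - w) 0 + w
    if b < c then c else b) b
  PySem.List.pySetD best j b

def solve' (String_ : String) (canPaste : List (Int × List Int)) (L : Int) : Int :=
  PySem.List.pyGetD ((PySem.List.pyRange (L - 1) (-1) (-1)).foldl (stepA canPaste) (List.replicate (L + 1).toNat 0)) 0 0

def solve_alt' (String_ : String) (canPaste : List (Int × List Int)) (L : Int) : Int :=
  PySem.List.pyGetD ((PySem.List.pyRange 1 (L + 1) 1).foldl
    (stepB (canPaste.foldl (stepE L) (List.replicate (L + 1).toNat []))) (List.replicate (L + 1).toNat 0)) L 0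

-- generic fold-max lemmas for B's inner loop
theorem foldmax_mono (c : Int → Int) :
    ∀ (lst : List Int) (b : Int), b ≤ lst.foldl (fun b w => if b < c w then c w else b) b := by
  intro lst
  induction lst with
  | nil => intro b; simp
  | cons w t ih =>
    intro b
    have h1 : b ≤ (if b < c w then c w else b) := by split <;> omega
    calc b ≤ (if b < c w then c w else b) := h1
    _ ≤ _ := ih _

theorem foldmax_mem (c : Int → Int) :
    ∀ (lst : List Int) (b w : Int), w ∈ lst → c w ≤ lst.foldl (fun b w => if b < c w then c w else b) b := by
  intro lst
  induction lst with
  | nil => intro b w h; simp at h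
  | cons x t ih =>
    intro b w h
    rcases List.mem_cons.mp h with h1 | h1
    · subst h1
      have h1 : c w ≤ (if b < c w then c w else b) := by split <;> omega
      calc c w ≤ (if b < c w then c w else b) := h1
      _ ≤ _ := foldmax_mono c t _
    · exact ih _ w h1

theorem foldmax_cases (c : Int → Int) :
    ∀ (lst : List Int) (b : Int), lst.foldl (fun b w => if b < c w then c w else b) b = b ∨
      ∃ w ∈ lst, lst.foldl (fun b w => if b < c w then c w else b) b = c w := by
  intro lst
  induction lst with
  | nil => intro b; left; simp
  | cons x t ih =>
    intro b
    simp only [List.foldl_cons]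
    rcases ih (if b < c x then c x else b) with h | ⟨w, hw, h⟩
    · rw [h]
      split
      · right; exact ⟨x, List.mem_cons_self, rfl⟩
      · left; rfl
    · right; exact ⟨w, List.mem_cons_of_mem _ hw, h⟩

theorem innerE {L q1 : Int} (hq0 : 0 ≤ q1) (hq1 : q1 < L) :
    ∀ (ws : List Int) (e0 : List (List Int)),
    (∀ w ∈ ws, 0 ≤ w ∧ q1 + w ≤ L) → e0.length = (L + 1).toNat →
    (ws.foldl (fun ends w =>
        PySem.List.pySetD ends (q1 + w) (PySem.List.pyGetD ends (q1 + w) [] ++ [w])) e0).length = (L + 1).toNat ∧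
    ∀ j w', 0 ≤ j → j ≤ L →
      (w' ∈ getl (ws.foldl (fun ends w =>
          PySem.List.pySetD ends (q1 + w) (PySem.List.pyGetD ends (q1 + w) [] ++ [w])) e0) j ↔
        w' ∈ getl e0 j ∨ (w' ∈ ws ∧ q1 + w' = j)) := by
  intro ws
  induction ws with
  | nil => intro e0 _ hlen; exact ⟨hlen, by simp⟩
  | cons w t ih =>
    intro e0 hb hlen
    have hw := hb w List.mem_cons_self
    simp only [List.foldl_cons]
    set e1 := PySem.List.pySetD e0 (q1 + w) (PySem.List.pyGetD e0 (q1 + w) [] ++ [w]) with he1def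
    have hlen1 : e1.length = (L + 1).toNat := by
      rw [he1def, PySem.List.length_pySetD, hlen]
    have hchar : ∀ j, 0 ≤ j →
        getl e1 j = if j = q1 + w then getl e0 (q1 + w) ++ [w] else getl e0 j := by
      intro j hj
      exact getl_set j _ (by omega) (by omega) hj
    obtain ⟨hlen2, hmem⟩ := ih e1 (fun w hw => hb w (List.mem_cons_of_mem _ hw)) hlen1
    refine ⟨hlen2, ?_⟩
    intro j w' hj0 hj1
    rw [hmem j w' hj0 hj1, hchar j hj0]
    by_cases hjq : j = q1 + w
    · rw [if_pos hjq]
      simp only [List.mem_append, List.mem_cons, List.not_mem_nil, or_false]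
      constructor
      · rintro ((h | h) | h)
        · rw [← hjq] at h; exact Or.inl h
        · exact Or.inr ⟨Or.inl h, by omega⟩
        · exact Or.inr ⟨Or.inr h.1, h.2⟩
      · rintro (h | ⟨(h | h), h2⟩)
        · rw [← hjq]; exact Or.inl (Or.inl h)
        · exact Or.inl (Or.inr h)
        · exact Or.inr ⟨h, h2⟩
    · rw [if_neg hjq]
      simp only [List.mem_cons]
      constructor
      · rintro (h | h)
        · exact Or.inl h
        · exact Or.inr ⟨Or.inr h.1, h.2⟩
      · rintro (h | ⟨(h | h), h2⟩)
        · exact Or.inl h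
        · exact absurd (h ▸ h2) (by omega)
        · exact Or.inr ⟨h, h2⟩

theorem endsAux {L : Int} :
    ∀ (Cs : List (Int × List Int)) (e0 : List (List Int)),
    PreP Cs L → e0.length = (L + 1).toNat →
    (Cs.foldl (stepE L) e0).length = (L + 1).toNat ∧
    ∀ j w, 0 ≤ j → j ≤ L →
      (w ∈ getl (Cs.foldl (stepE L) e0) j ↔
        w ∈ getl e0 j ∨ ∃ q ∈ Cs, 0 ≤ q.1 ∧ q.1 < L ∧ w ∈ q.2 ∧ q.1 + w = j) := by
  intro Cs
  induction Cs with
  | nil => intro e0 _ hlen; exact ⟨hlen, by simp⟩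
  | cons q t ih =>
    intro e0 hpre hlen
    simp only [List.foldl_cons]
    have hpret : PreP t L := fun p hp => hpre p (List.mem_cons_of_mem _ hp)
    by_cases hq : 0 ≤ q.1 ∧ q.1 < L
    · have hbq : ∀ w ∈ q.2, 0 ≤ w ∧ q.1 + w ≤ L :=
        fun w hw => hpre q List.mem_cons_self hq.1 hq.2 w hw
      obtain ⟨hlen1, hchar1⟩ := innerE hq.1 hq.2 q.2 e0 hbq hlen
      rw [show stepE L e0 q = q.2.foldl (fun ends w =>
        PySem.List.pySetD ends (q.1 + w) (PySem.List.pyGetD ends (q.1 + w) [] ++ [w])) e0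
        from by rw [stepE, if_pos hq]]
      obtain ⟨hlen2, hchar2⟩ := ih _ hpret hlen1
      refine ⟨hlen2, ?_⟩
      intro j w hj0 hj1
      rw [hchar2 j w hj0 hj1, hchar1 j w hj0 hj1]
      simp only [List.mem_cons]
      constructor
      · rintro ((h | h) | ⟨p, hp, h⟩)
        · exact Or.inl h
        · exact Or.inr ⟨q, Or.inl rfl, hq.1, hq.2, h.1, h.2⟩
        · exact Or.inr ⟨p, Or.inr hp, h⟩
      · rintro (h | ⟨p, (hp | hp), h⟩)
        · exact Or.inl (Or.inl h)
        · exact Or.inl (Or.inr ⟨(hp ▸ h).2.2.1, (hp ▸ h).2.2.2⟩)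
        · exact Or.inr ⟨p, hp, h⟩
    · rw [show stepE L e0 q = e0 from by rw [stepE, if_neg hq]]
      obtain ⟨hlen2, hchar2⟩ := ih _ hpret hlen
      refine ⟨hlen2, ?_⟩
      intro j w hj0 hj1
      rw [hchar2 j w hj0 hj1]
      simp only [List.mem_cons]
      constructor
      · rintro (h | ⟨p, hp, h⟩)
        · exact Or.inl h
        · exact Or.inr ⟨p, Or.inr hp, h⟩
      · rintro (h | ⟨p, (hp | hp), h⟩)
        · exact Or.inl h
        · exact absurd ⟨hp ▸ h.1, hp ▸ h.2.1⟩ hq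
        · exact Or.inr ⟨p, hp, h⟩

theorem covers_inv {C : List (Int × List Int)} {L a v : Int} (h : Covers C L a v) :
    (a = L ∧ v = 0) ∨ (0 ≤ a ∧ a < L ∧ Covers C L (a + 1) v) ∨
    (∃ ws w v0, v = v0 + w ∧ 0 ≤ a ∧ a < L ∧ C.lookup a = some ws ∧ w ∈ ws ∧ 0 < w ∧
      a + w ≤ L ∧ Covers C L (a + w) v0) := by
  cases h with
  | base => exact Or.inl ⟨rfl, rfl⟩
  | skip h0 h1 hc => exact Or.inr (Or.inl ⟨h0, h1, hc⟩)
  | word h0 h1 hlk hw hwp hle hc => exact Or.inr (Or.inr ⟨_, _, _, rfl, h0, h1, hlk, hw, hwp, hle, hc⟩)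

theorem coversB_inv {C : List (Int × List Int)} {L j v : Int} (h : CoversB C L j v) :
    (j = 0 ∧ v = 0) ∨ (∃ j', j = j' + 1 ∧ 0 ≤ j' ∧ j' < L ∧ CoversB C L j' v) ∨
    (∃ i ws w v0, j = i + w ∧ v = v0 + w ∧ 0 ≤ i ∧ i < L ∧ C.lookup i = some ws ∧ w ∈ ws ∧
      0 < w ∧ i + w ≤ L ∧ CoversB C L i v0) := by
  cases h with
  | base => exact Or.inl ⟨rfl, rfl⟩
  | skip h0 h1 hc => exact Or.inr (Or.inl ⟨_, rfl, h0, h1, hc⟩)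
  | word h0 h1 hlk hw hwp hle hc => exact Or.inr (Or.inr ⟨_, _, _, _, rfl, rfl, h0, h1, hlk, hw, hwp, hle, hc⟩)

def GoodA (C : List (Int × List Int)) (L : Int) (cache : List Int) (p : Int) : Prop :=
  cache.length = (L + 1).toNat ∧
  (∀ q : Int, p ≤ q → q ≤ L → Covers C L q (geti cache q) ∧ ∀ v, Covers C L q v → v ≤ geti cache q) ∧
  (∀ q : Int, 0 ≤ q → q < p → geti cache q = 0)

theorem innerA {C : List (Int × List Int)} {L pos : Int} {ws0 : List Int}
    (h0 : 0 ≤ pos) (h1 : pos < L) (hlk : C.lookup pos = some ws0)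
    (cache0 : List Int)
    (hach0 : ∀ q : Int, pos < q → q ≤ L → Covers C L q (geti cache0 q)) :
    ∀ (ws : List Int) (cache1 : List Int),
    (∀ w ∈ ws, w ∈ ws0) →
    (∀ w ∈ ws, 0 ≤ w ∧ pos + w ≤ L) →
    cache1.length = (L + 1).toNat →
    (∀ q : Int, 0 ≤ q → q ≠ pos → geti cache1 q = geti cache0 q) →
    Covers C L pos (geti cache1 pos) →
    (ws.foldl (fun cache w =>
        PySem.List.pySetD cache pos
          (max (PySem.List.pyGetD cache pos 0) (PySem.List.pyGetD cache (pos + w) 0 + w))) cache1).length = (L + 1).toNat ∧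
    (∀ q : Int, 0 ≤ q → q ≠ pos → geti (ws.foldl (fun cache w =>
        PySem.List.pySetD cache pos
          (max (PySem.List.pyGetD cache pos 0) (PySem.List.pyGetD cache (pos + w) 0 + w))) cache1) q = geti cache0 q) ∧
    Covers C L pos (geti (ws.foldl (fun cache w =>
        PySem.List.pySetD cache pos
          (max (PySem.List.pyGetD cache pos 0) (PySem.List.pyGetD cache (pos + w) 0 + w))) cache1) pos) ∧
    geti cache1 pos ≤ geti (ws.foldl (fun cache w =>
        PySem.List.pySetD cache pos
          (max (PySem.List.pyGetD cache pos 0) (PySem.List.pyGetD cache (pos + w) 0 + w))) cache1) pos ∧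
    (∀ w ∈ ws, 0 < w → geti cache0 (pos + w) + w ≤ geti (ws.foldl (fun cache w =>
        PySem.List.pySetD cache pos
          (max (PySem.List.pyGetD cache pos 0) (PySem.List.pyGetD cache (pos + w) 0 + w))) cache1) pos) := by
  intro ws
  induction ws with
  | nil =>
    intro cache1 _ _ hlen hrest hach
    exact ⟨hlen, hrest, hach, le_refl _, by simp⟩
  | cons w t ih =>
    intro cache1 hsub hb hlen hrest hach
    have hwb := hb w List.mem_cons_self
    simp only [List.foldl_cons]
    set acc := geti cache1 pos with hacc
    set m := max (PySem.List.pyGetD cache1 pos 0) (PySem.List.pyGetD cache1 (pos + w) 0 + w) with hm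
    set cache2 := PySem.List.pySetD cache1 pos m with hc2
    have hlen2 : cache2.length = (L + 1).toNat := by
      rw [hc2, PySem.List.length_pySetD, hlen]
    have hget2 : ∀ q : Int, 0 ≤ q → geti cache2 q = if q = pos then m else geti cache1 q := by
      intro q hq
      exact geti_set q m h0 (by omega) hq
    have hrest2 : ∀ q : Int, 0 ≤ q → q ≠ pos → geti cache2 q = geti cache0 q := by
      intro q hq hne
      rw [hget2 q hq, if_neg hne]; exact hrest q hq hne
    have hm2 : geti cache2 pos = m := by rw [hget2 pos h0, if_pos rfl]
    have haccm : acc ≤ m := le_max_left _ _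
    have hach2 : Covers C L pos (geti cache2 pos) := by
      rw [hm2]
      rcases max_choice (PySem.List.pyGetD cache1 pos 0) (PySem.List.pyGetD cache1 (pos + w) 0 + w) with hch | hch
      · rw [← hm] at hch; rw [hch]; exact hach
      · rw [← hm] at hch; rw [hch]
        by_cases hw0 : w = 0
        · have : PySem.List.pyGetD cache1 (pos + w) 0 = acc := by
            rw [hw0]; simpa using hacc.symm ▸ rfl
          rw [this, hw0, add_zero]; exact hach
        · have hwpos : 0 < w := by omega
          have hcc : PySem.List.pyGetD cache1 (pos + w) 0 = geti cache0 (pos + w) :=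
            hrest (pos + w) (by omega) (by omega)
          rw [hcc]
          exact Covers.word h0 h1 hlk (hsub w List.mem_cons_self) hwpos hwb.2
            (hach0 (pos + w) (by omega) hwb.2)
    obtain ⟨rlen, rrest, rach, rmono, rws⟩ := ih cache2
      (fun w hw => hsub w (List.mem_cons_of_mem _ hw))
      (fun w hw => hb w (List.mem_cons_of_mem _ hw)) hlen2 hrest2 hach2
    refine ⟨rlen, rrest, rach, ?_, ?_⟩
    · calc acc ≤ m := haccm
      _ = geti cache2 pos := hm2.symm
      _ ≤ _ := rmono
    · intro w' hw' hwp'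
      rcases List.mem_cons.mp hw' with h | h
      · subst h
        have hcc : PySem.List.pyGetD cache1 (pos + w') 0 = geti cache0 (pos + w') :=
          hrest (pos + w') (by omega) (by omega)
        have : geti cache0 (pos + w') + w' ≤ m := by
          rw [hm, ← hcc]; exact le_max_right _ _
        calc geti cache0 (pos + w') + w' ≤ m := this
        _ = geti cache2 pos := hm2.symm
        _ ≤ _ := rmono
      · exact rws w' h hwp'

theorem stepA_good {C : List (Int × List Int)} {L : Int} (hpre : PreP C L)
    {cache : List Int} {pos : Int} (h0 : 0 ≤ pos) (h1 : pos < L)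
    (hG : GoodA C L cache (pos + 1)) : GoodA C L (stepA C cache pos) pos := by
  obtain ⟨hlen, hq, hz⟩ := hG
  have hlpos : (pos : Int) < cache.length := by rw [hlen]; omega
  set a1 := PySem.List.pyGetD cache (pos + 1) 0 with ha1
  set cache1 := PySem.List.pySetD cache pos a1 with hc1
  have hlen1 : cache1.length = (L + 1).toNat := by
    rw [hc1, PySem.List.length_pySetD, hlen]
  have hget1 : ∀ q : Int, 0 ≤ q → geti cache1 q = if q = pos then a1 else geti cache q := by
    intro q hqq; exact geti_set q a1 h0 hlpos hqq
  have hrest1 : ∀ q : Int, 0 ≤ q → q ≠ pos → geti cache1 q = geti cache q := by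
    intro q hqq hne; rw [hget1 q hqq, if_neg hne]
  have hp1 : Covers C L (pos + 1) a1 := (hq (pos + 1) (le_refl _) (by omega)).1
  have hub1 : ∀ v, Covers C L (pos + 1) v → v ≤ a1 := (hq (pos + 1) (le_refl _) (by omega)).2
  have hach1 : Covers C L pos (geti cache1 pos) := by
    rw [hget1 pos h0, if_pos rfl]
    exact Covers.skip h0 h1 hp1
  have hach0 : ∀ q : Int, pos < q → q ≤ L → Covers C L q (geti cache q) :=
    fun q hq1 hq2 => (hq q (by omega) hq2).1
  rw [show stepA C cache pos = (match C.lookup pos with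
    | some ws => ws.foldl (fun cache w =>
        PySem.List.pySetD cache pos
          (max (PySem.List.pyGetD cache pos 0) (PySem.List.pyGetD cache (pos + w) 0 + w))) cache1
    | none => cache1) from rfl]
  cases hlk : C.lookup pos with
  | none =>
    show GoodA C L cache1 pos
    refine ⟨hlen1, ?_, ?_⟩
    · intro q hq1 hq2
      by_cases hqe : q = pos
      · subst hqe
        refine ⟨hach1, ?_⟩
        intro v hv
        rcases covers_inv hv with ⟨he, hv0⟩ | ⟨_, _, hc⟩ | ⟨ws, w, v0, _, _, _, hlk2, _⟩
        · omega
        · rw [hget1 q h0, if_pos rfl]; exact hub1 v hc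
        · rw [hlk] at hlk2; exact absurd hlk2 (by simp)
      · rw [hrest1 q (by omega) hqe]
        exact hq q (by omega) hq2
    · intro q hq1 hq2
      rw [hrest1 q hq1 (by omega)]
      exact hz q hq1 (by omega)
  | some ws =>
    show GoodA C L (ws.foldl (fun cache w =>
      PySem.List.pySetD cache pos
        (max (PySem.List.pyGetD cache pos 0) (PySem.List.pyGetD cache (pos + w) 0 + w))) cache1) pos
    have hmem : (pos, ws) ∈ C := lookup_mem hlk
    have hb : ∀ w ∈ ws, 0 ≤ w ∧ pos + w ≤ L := hpre (pos, ws) hmem h0 h1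
    obtain ⟨rlen, rrest, rach, rmono, rws⟩ := innerA h0 h1 hlk cache hach0 ws cache1
      (fun _ hw => hw) hb hlen1 hrest1 hach1
    refine ⟨rlen, ?_, ?_⟩
    · intro q hq1 hq2
      by_cases hqe : q = pos
      · subst hqe
        refine ⟨rach, ?_⟩
        intro v hv
        rcases covers_inv hv with ⟨he, hv0⟩ | ⟨_, _, hc⟩ | ⟨ws', w, v0, hve, _, _, hlk2, hw, hwp, hle, hc⟩
        · omega
        · have : v ≤ a1 := hub1 v hc
          have h2 : a1 = geti cache1 q := by rw [hget1 q h0, if_pos rfl]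
          calc v ≤ a1 := this
          _ = geti cache1 q := h2
          _ ≤ _ := rmono
        · rw [hlk] at hlk2
          have hwse : ws' = ws := by injection hlk2.symm
          subst hwse
          have hv0 : v0 ≤ geti cache (q + w) := (hq (q + w) (by omega) hle).2 v0 hc
          have := rws w hw hwp
          omega
      · rw [rrest q (by omega) hqe]
        exact hq q (by omega) hq2
    · intro q hq1 hq2
      rw [rrest q hq1 (by omega)]
      exact hz q hq1 (by omega)

theorem loopA {C : List (Int × List Int)} {L : Int} (hpre : PreP C L) :
    ∀ (k : ℕ) (p : Int), p = k → p ≤ L → ∀ cache : List Int, GoodA C L cache p →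
    GoodA C L ((PySem.List.pyRange (p - 1) (-1) (-1)).foldl (stepA C) cache) 0 := by
  intro k
  induction k with
  | zero =>
    intro p hp _ cache hG
    have hp0 : p = 0 := by exact_mod_cast hp
    subst hp0
    rw [PySem.List.pyRange_neg_one_eq_nil (by norm_num)]
    simpa using hG
  | succ k ih =>
    intro p hp hpL cache hG
    rw [PySem.List.pyRange_neg_one_cons (by omega)]
    rw [List.foldl_cons]
    have hstep : GoodA C L (stepA C cache (p - 1)) (p - 1) := by
      apply stepA_good hpre (by omega) (by omega)
      rw [show p - 1 + 1 = p by ring]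
      exact hG
    have := ih (p - 1) (by omega) (by omega) _ hstep
    rw [show p - 1 - 1 = p - 2 by ring] at this
    rw [show p - 1 - 1 = p - 2 by ring]
    exact this

def EndsOk (C : List (Int × List Int)) (L : Int) (ends : List (List Int)) : Prop :=
  ends.length = (L + 1).toNat ∧
  ∀ j w : Int, 0 ≤ j → j ≤ L →
    (w ∈ getl ends j ↔ ∃ q ∈ C, 0 ≤ q.1 ∧ q.1 < L ∧ w ∈ q.2 ∧ q.1 + w = j)

theorem ends_ok {C : List (Int × List Int)} {L : Int} (hL : 0 ≤ L) (hpre : PreP C L) :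
    EndsOk C L (C.foldl (stepE L) (List.replicate (L + 1).toNat [])) := by
  obtain ⟨hlen, hchar⟩ := endsAux C (List.replicate (L + 1).toNat []) hpre (by simp)
  refine ⟨hlen, ?_⟩
  intro j w hj0 hj1
  rw [hchar j w hj0 hj1, getl_replicate hj0 (by omega)]
  simp

def GoodB (C : List (Int × List Int)) (L : Int) (best : List Int) (p : Int) : Prop :=
  best.length = (L + 1).toNat ∧
  (∀ q : Int, 0 ≤ q → q ≤ L → CoversB C L q (geti best q)) ∧
  (∀ q : Int, 0 ≤ q → q ≤ p → ∀ v, CoversB C L q v → v ≤ geti best q) ∧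
  (∀ q : Int, p < q → q ≤ L → geti best q = 0)

theorem stepB_good {C : List (Int × List Int)} {L : Int} {ends : List (List Int)}
    (hnd : (C.map Prod.fst).Nodup) (hpre : PreP C L) (hE : EndsOk C L ends)
    {best : List Int} {p : Int} (hp : 1 ≤ p) (hpL : p ≤ L)
    (hG : GoodB C L best (p - 1)) : GoodB C L (stepB ends best p) p := by
  obtain ⟨hlen, hach, hub, hz⟩ := hG
  set b0 := PySem.List.pyGetD best (p - 1) 0 with hb0
  set lst := PySem.List.pyGetD ends p [] with hlst
  set cfun := fun w : Int => PySem.List.pyGetD best (p - w) 0 + w with hcfun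
  set bf := lst.foldl (fun b w =>
    let c := PySem.List.pyGetD best (p - w) 0 + w
    if b < c then c else b) b0 with hbf
  have hbf2 : bf = lst.foldl (fun b w => if b < cfun w then cfun w else b) b0 := rfl
  have hlstc : lst = getl ends p := rfl
  have hmemlst : ∀ w : Int, w ∈ lst ↔
      ∃ q ∈ C, 0 ≤ q.1 ∧ q.1 < L ∧ w ∈ q.2 ∧ q.1 + w = p := by
    intro w; rw [hlstc]; exact hE.2 p w (by omega) hpL
  show GoodB C L (PySem.List.pySetD best p bf) p
  have hlen2 : (PySem.List.pySetD best p bf).length = (L + 1).toNat := by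
    rw [PySem.List.length_pySetD, hlen]
  have hget2 : ∀ q : Int, 0 ≤ q →
      geti (PySem.List.pySetD best p bf) q = if q = p then bf else geti best q := by
    intro q hq; exact geti_set q bf (by omega) (by rw [hlen]; omega) hq
  have hmono : b0 ≤ bf := by rw [hbf2]; exact foldmax_mono cfun lst b0
  have hachp : CoversB C L p bf := by
    rcases hbf2 ▸ foldmax_cases cfun lst b0 with hc | ⟨w, hw, hc⟩
    · rw [hc]
      have := hach (p - 1) (by omega) (by omega)
      have h2 : CoversB C L (p - 1 + 1) b0 := CoversB.skip (by omega) (by omega) this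
      rw [show p - 1 + 1 = p by ring] at h2
      exact h2
    · rw [hc]
      obtain ⟨q, hqC, hq0, hq1, hwq, hqe⟩ := (hmemlst w).mp hw
      have hwb : 0 ≤ w ∧ q.1 + w ≤ L := hpre q hqC hq0 hq1 w hwq
      by_cases hw0 : w = 0
      · subst hw0
        have : PySem.List.pyGetD best (p - 0) 0 = 0 := by
          rw [show p - 0 = p by ring]; exact hz p (by omega) hpL
        rw [hcfun]; simp only [this, add_zero]
        exact coversB_zero p (by omega) hpL
      · have hlkq : C.lookup q.1 = some q.2 := mem_lookup hnd (by rw [Prod.mk.eta] at *; exact hqC)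
        have hcov : CoversB C L (q.1 + w) (geti best q.1 + w) :=
          CoversB.word hq0 hq1 hlkq hwq (by omega) hwb.2 (hach q.1 (by omega) (by omega))
        rw [hqe] at hcov
        have : cfun w = geti best q.1 + w := by
          rw [hcfun]; simp only [show p - w = q.1 by omega]; rfl
        rw [this]
        exact hcov
  refine ⟨hlen2, ?_, ?_, ?_⟩
  · intro q hq0 hqL
    rw [hget2 q hq0]
    by_cases hqe : q = p
    · rw [if_pos hqe, hqe]; exact hachp
    · rw [if_neg hqe]; exact hach q hq0 hqL
  · intro q hq0 hqp v hv
    rw [hget2 q hq0]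
    by_cases hqe : q = p
    · rw [if_pos hqe]
      rw [hqe] at hv
      rcases coversB_inv hv with ⟨he, _⟩ | ⟨j', hje, hj0, hj1, hc⟩ |
        ⟨i, ws, w, v0, hje, hve, hi0, hi1, hlk, hw, hwp, hle, hc⟩
      · omega
      · have : v ≤ geti best j' := hub j' hj0 (by omega) v hc
        have h2 : geti best j' = b0 := by rw [hb0, show j' = p - 1 by omega]; rfl
        omega
      · have hv0 : v0 ≤ geti best i := hub i hi0 (by omega) v0 hc
        have hwmem : w ∈ lst := by
          rw [hmemlst w]
          exact ⟨(i, ws), lookup_mem hlk, hi0, hi1, hw, by omega⟩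
        have hcle : cfun w ≤ bf := by rw [hbf2]; exact foldmax_mem cfun lst b0 w hwmem
        have : cfun w = geti best (p - w) + w := rfl
        have h3 : p - w = i := by omega
        rw [h3] at this
        omega
    · rw [if_neg hqe]
      exact hub q hq0 (by omega) v hv
  · intro q hqp hqL
    rw [hget2 q (by omega), if_neg (by omega)]
    exact hz q (by omega) hqL

theorem loopB {C : List (Int × List Int)} {L : Int} {ends : List (List Int)}
    (hnd : (C.map Prod.fst).Nodup) (hpre : PreP C L) (hE : EndsOk C L ends) (hL : 0 ≤ L) :
    ∀ (k : ℕ) (p : Int), p = k → p ≤ L →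
    GoodB C L ((PySem.List.pyRange 1 (p + 1) 1).foldl (stepB ends) (List.replicate (L + 1).toNat 0)) p := by
  intro k
  induction k with
  | zero =>
    intro p hp _
    have hp0 : p = 0 := by exact_mod_cast hp
    subst hp0
    rw [show (0:ℤ) + 1 = 1 by ring, PySem.List.pyRange_one_eq_nil (le_refl _)]
    simp only [List.foldl_nil]
    refine ⟨by simp, ?_, ?_, ?_⟩
    · intro q hq0 hqL
      rw [show geti (List.replicate (L + 1).toNat 0) q = 0 from geti_replicate q]
      exact coversB_zero q hq0 hqL
    · intro q hq0 hqp v hv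
      rcases coversB_inv hv with ⟨_, hv0⟩ | ⟨j', hje, hj0, _⟩ | ⟨i, ws, w, v0, hje, _, hi0, _, _, _, hwp, _⟩
      · rw [geti_replicate q]; omega
      · omega
      · omega
    · intro q hq0 hqL; exact geti_replicate q
  | succ k ih =>
    intro p hp hpL
    have h1p : 1 ≤ p := by omega
    rw [PySem.List.pyRange_one_succ_right (by omega), List.foldl_append, List.foldl_cons, List.foldl_nil]
    have := ih (p - 1) (by omega) (by omega)
    rw [show p - 1 + 1 = p by ring] at this
    exact stepB_good hnd hpre hE h1p hpL this

theorem initA {C : List (Int × List Int)} {L : Int} (hL : 0 ≤ L) :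
    GoodA C L (List.replicate (L + 1).toNat 0) L := by
  refine ⟨by simp, ?_, ?_⟩
  · intro q hq1 hq2
    have hq : q = L := le_antisymm hq2 hq1
    subst hq
    rw [show geti (List.replicate (q + 1).toNat 0) q = 0 from geti_replicate q]
    refine ⟨Covers.base, ?_⟩
    intro v hv
    rcases covers_inv hv with ⟨_, hv0⟩ | ⟨_, h1, _⟩ | ⟨ws, w, v0, _, _, h1, _⟩
    · omega
    · omega
    · omega
  · intro q hq1 hq2
    exact geti_replicate q

theorem main_eq {C : List (Int × List Int)} {L : Int} (S : String)
    (hL : 0 ≤ L) (hnd : (C.map Prod.fst).Nodup) (hpre : PreP C L) :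
    solve' S C L = solve_alt' S C L := by
  have hA : GoodA C L ((PySem.List.pyRange (L - 1) (-1) (-1)).foldl (stepA C)
      (List.replicate (L + 1).toNat 0)) 0 :=
    loopA hpre L.toNat L (by omega) (le_refl _) _ (initA hL)
  have hB : GoodB C L ((PySem.List.pyRange 1 (L + 1) 1).foldl
      (stepB (C.foldl (stepE L) (List.replicate (L + 1).toNat []))) (List.replicate (L + 1).toNat 0)) L :=
    loopB hnd hpre (ends_ok hL hpre) hL L.toNat L (by omega) (le_refl _)
  set cacheF := (PySem.List.pyRange (L - 1) (-1) (-1)).foldl (stepA C)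
      (List.replicate (L + 1).toNat 0) with hcF
  set bestF := (PySem.List.pyRange 1 (L + 1) 1).foldl
      (stepB (C.foldl (stepE L) (List.replicate (L + 1).toNat []))) (List.replicate (L + 1).toNat 0) with hbF
  have hAach : Covers C L 0 (geti cacheF 0) := (hA.2.1 0 (le_refl _) hL).1
  have hAub : ∀ v, Covers C L 0 v → v ≤ geti cacheF 0 := (hA.2.1 0 (le_refl _) hL).2
  have hBach : CoversB C L L (geti bestF L) := hB.2.1 L hL (le_refl _)
  have hBub : ∀ v, CoversB C L L v → v ≤ geti bestF L := fun v hv => hB.2.2.1 L hL (le_refl _) v hv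
  have le1 : geti cacheF 0 ≤ geti bestF L := by
    have h := splice hAach CoversB.base
    rw [zero_add] at h
    exact hBub _ h
  have le2 : geti bestF L ≤ geti cacheF 0 := by
    have h := revSplice hBach Covers.base
    rw [zero_add] at h
    exact hAub _ h
  show geti cacheF 0 = geti bestF L
  omega


-- ===== VERDICT (by name: the statement is the Claim_ definition above) =====
theorem solve_spec : Claim_equal_solve := by
  intro S C L _hdom hpre
  obtain ⟨hL, hnd, hpre2⟩ := hpre
  show solve S C L = solve_alt S C L
  have h1 : solve S C L = solve' S C L := rfl
  have h2 : solve_alt S C L = solve_alt' S C L := rfl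
  rw [h1, h2]
  exact main_eq S hL hnd hpre2
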